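-- pv_equiv track=rewrite | github.com/DANAPAZ89/Curso-Harvard | Python/src/ejercicios_python/regular_expressions_ejercicios_dia_18.py | count_words1
-- ===== SOURCE A (Python) =====
-- def count_words1(lst):
--     num = 0
--     lst_words = []
--     for word in lst:
--         num = lst.count(word)
--         if  (num,word) not in lst_words:
--             lst_words.append((num,word))
--     return lst_words
-- ===== SOURCE B (Python) =====
-- def count_words1(lst):
--     counts = {}
--     for word in lst:
--         counts[word] = counts.get(word, 0) + 1
--     return [(c, w) for w, c in counts.items()]
-- ===== Notes on version B (the rewrite author's own statement) =====
-- stated objective: faster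
-- what changed: Replaces A's per-element lst.count scan and dedup-by-membership list with a single frequency dict built in one pass plus one emit pass over its items.
import Mathlib
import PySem

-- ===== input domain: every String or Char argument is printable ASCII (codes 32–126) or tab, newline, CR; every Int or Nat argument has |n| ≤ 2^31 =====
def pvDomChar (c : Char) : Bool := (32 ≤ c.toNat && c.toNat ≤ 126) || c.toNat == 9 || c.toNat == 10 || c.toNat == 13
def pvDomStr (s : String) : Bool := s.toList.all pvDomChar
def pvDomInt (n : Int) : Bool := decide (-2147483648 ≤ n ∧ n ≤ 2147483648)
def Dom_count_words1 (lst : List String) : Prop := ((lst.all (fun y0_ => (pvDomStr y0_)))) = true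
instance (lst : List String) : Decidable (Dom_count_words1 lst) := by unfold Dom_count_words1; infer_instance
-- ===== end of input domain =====

-- B replaces A's per-element full-list count scans and membership dedup with one
-- frequency dict built in a single pass (objective: faster, O(n^2) → O(n)).

-- ===== PORT A =====
def count_words1 (lst : List String) : List (Int × String) :=
  lst.foldl
    (fun lst_words word =>
      let num : Int := (PySem.List.count lst word : Int)
      if (num, word) ∈ lst_words then lst_words else lst_words ++ [(num, word)])
    ([] : List (Int × String))

-- ===== PORT B =====
def count_words1_alt (lst : List String) : List (Int × String) :=
  let counts : PySem.Dict String Int :=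
    lst.foldl (fun d word => d.insert word (d.getD word 0 + 1)) PySem.Dict.empty
  counts.items.map (fun p => (p.2, p.1))

-- ===== PRECONDITION & SPEC =====
def Spec_count_words1 (lst : List String) (out : List (Int × String)) : Prop := out = count_words1_alt lst
instance (lst : List String) (out : List (Int × String)) : Decidable (Spec_count_words1 lst out) := by unfold Spec_count_words1; infer_instance

-- ===== CLAIM (what is proved, stated in full; the proofs are below) =====
def Claim_equal_count_words1 : Prop := ∀ (lst : List String), Dom_count_words1 lst → Spec_count_words1 lst (count_words1 lst)

-- ===== LEMMAS AND PROOFS =====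

-- A's loop over a prefix p, started from the image of a set s, is the image of the Set.add loop:
-- the membership test '(num, word) ∈ acc' coincides with 'word ∈ s' because the pairing is injective in the word.
lemma count_words1_foldA (full : List String) (p : List String) :
    ∀ (s : List String),
      p.foldl
        (fun lst_words word =>
          let num : Int := (PySem.List.count full word : Int)
          if (num, word) ∈ lst_words then lst_words else lst_words ++ [(num, word)])
        (s.map (fun w => ((PySem.List.count full w : Int), w)))
      = (p.foldl PySem.Set.add s).map (fun w => ((PySem.List.count full w : Int), w)) := by
  induction p with
  | nil => intro s; rfl
  | cons x xs ih =>
    intro s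
    simp only [List.foldl_cons]
    have hmem : (((PySem.List.count full x : Int), x) ∈
        s.map (fun w => ((PySem.List.count full w : Int), w))) ↔ x ∈ s := by
      constructor
      · intro h
        rcases List.mem_map.mp h with ⟨a, ha, hEq⟩
        have : a = x := congrArg Prod.snd hEq
        exact this ▸ ha
      · intro h; exact List.mem_map.mpr ⟨x, h, rfl⟩
    by_cases hx : x ∈ s
    · rw [if_pos (hmem.mpr hx), PySem.Set.add_of_mem hx, ih s]
    · rw [if_neg (fun h => hx (hmem.mp h)), PySem.Set.add_of_not_mem hx]
      have hsingle : (s.map (fun w => ((PySem.List.count full w : Int), w)))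
          ++ [((PySem.List.count full x : Int), x)]
          = (s ++ [x]).map (fun w => ((PySem.List.count full w : Int), w)) := by
        simp
      rw [hsingle]
      exact ih (s ++ [x])

-- ===== VERDICT (by name: the statement is the Claim_ definition above) =====
theorem count_words1_spec : Claim_equal_count_words1 := by
  intro lst _
  show count_words1 lst = count_words1_alt lst
  have hA : count_words1 lst
      = (PySem.Set.ofList lst).map (fun w => ((PySem.List.count lst w : Int), w)) := by
    have h := count_words1_foldA lst lst []
    simp only [List.map_nil] at h
    rw [← PySem.Set.ofList_eq_foldl] at h
    exact h
  have hB : count_words1_alt lst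
      = ((PySem.Dict.counter lst).items).map (fun p => (p.2, p.1)) := by
    unfold count_words1_alt
    rw [PySem.Dict.foldl_insert_getD_add_one_eq_counter]
  rw [hA, hB, PySem.Dict.items_counter, List.map_map]
  exact List.map_congr_left fun w _ => by simp [PySem.List.count_eq]
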